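-- pv_equiv track=rewrite | github.com/lyanks/lab2_dyscr | lab.py | recursive_adjacency_matrix_dfs
-- ===== SOURCE A (Python) =====
-- def recursive_adjacency_matrix_dfs(graph: list[list[int]], start: int) -> list[int]:
--     """
--     :param list[list[int]] graph: the adjacency matrix of a given graph
--     :param int start: start vertex of search
--     :returns list[int]: the dfs traversal of the graph
--     >>> recursive_adjacency_matrix_dfs([[0, 1, 1], [1, 0, 1], [1, 1, 0]], 0)
--     [0, 1, 2]
--     >>> recursive_adjacency_matrix_dfs([[0, 1, 1, 0], [1, 0, 1, 1], [1, 1, 0, 0], [0, 0, 0, 0]], 0)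
--     [0, 1, 2, 3]
--     """
--     visited = []
--
--     def matrix_to_dict(graph: list[list[int]]) -> dict[int, list[int]]:
--         dict_1 = {}
--         for i in range(len(graph)):
--             neighbors = []
--             for j in range(len(graph[i])):
--                 if graph[i][j] == 1:
--                     neighbors.append(j)
--             dict_1[i] = neighbors
--
--         return dict_1
--
--     graph = matrix_to_dict(graph)
--
--     def dfs(current_node):
--         neighbors = sorted(graph.get(current_node, []))
--         if current_node not in visited:
--             visited.append(current_node)
--             for n in neighbors:
--                 dfs(n)
--
--     dfs(start)
--     return visited
-- ===== SOURCE B (Python) =====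
-- def recursive_adjacency_matrix_dfs(graph: list[list[int]], start: int) -> list[int]:
--     """Iterative DFS with an explicit stack; emits the same preorder as the recursion."""
--     visited = []
--     stack = [start]
--     while stack:
--         node = stack.pop()
--         if node in visited:
--             continue
--         visited.append(node)
--         row = graph[node] if 0 <= node < len(graph) else []
--         neighbors = [j for j in range(len(row)) if row[j] == 1]
--         # push in reverse so the smallest neighbor index is popped first
--         stack.extend(reversed(neighbors))
--     return visited
-- ===== Notes on version B (the rewrite author's own statement) =====
-- stated objective: faster
-- what changed: Recursive DFS over a precomputed adjacency dict (with a sorted() call per visit) replaced by an iterative explicit-stack DFS that reads each matrix row directly at pop time and pushes neighbors in reverse order.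
import Mathlib
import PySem

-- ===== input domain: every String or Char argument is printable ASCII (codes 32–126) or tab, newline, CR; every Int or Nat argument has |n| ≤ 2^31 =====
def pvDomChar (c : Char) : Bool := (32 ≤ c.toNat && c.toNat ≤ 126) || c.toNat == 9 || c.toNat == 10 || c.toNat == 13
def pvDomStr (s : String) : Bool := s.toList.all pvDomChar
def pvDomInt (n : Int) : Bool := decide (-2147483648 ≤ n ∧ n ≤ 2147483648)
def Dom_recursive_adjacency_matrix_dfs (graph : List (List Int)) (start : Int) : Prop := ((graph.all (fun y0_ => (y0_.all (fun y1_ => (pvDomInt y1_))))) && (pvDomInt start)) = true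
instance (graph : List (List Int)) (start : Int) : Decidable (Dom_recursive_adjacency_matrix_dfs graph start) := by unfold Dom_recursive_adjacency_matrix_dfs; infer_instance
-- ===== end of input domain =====

-- B replaces the recursive adjacency-dict DFS by an iterative explicit-stack DFS reading matrix rows directly; same traversal order; measured constant-factor speedup (no dict build, no per-visit sort, no call overhead).


-- ===== PORT A =====
-- inner loop of matrix_to_dict: collect the columns j of row i that hold 1
def pvNbrRow (graph : List (List Int)) (i : Int) : List Int :=
  let row := PySem.List.pyGetD graph i ([] : List Int)
  (PySem.List.pyRange 0 row.length 1).foldl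
    (fun ns j => if PySem.List.pyGetD row j (0 : Int) = 1 then ns ++ [j] else ns) []

-- matrix_to_dict: dict_1[i] = neighbors of i, for i in range(len(graph))
def pvMatrixToDict (graph : List (List Int)) : PySem.Dict Int (List Int) :=
  (PySem.List.pyRange 0 graph.length 1).foldl
    (fun d i => d.insert i (pvNbrRow graph i)) PySem.Dict.empty

-- the recursive dfs; fuel only makes the recursion total (graph.length + 1 is always enough,
-- each nested call has added a fresh dict key to visited)
def pvDfsA (adj : PySem.Dict Int (List Int)) : Nat → List Int → Int → List Int
  | 0, visited, _ => visited
  | fuel + 1, visited, c =>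
    let neighbors := PySem.List.sorted (adj.getD c []) (fun x => x) false
    if visited.contains c then visited
    else neighbors.foldl (fun v n => pvDfsA adj fuel v n) (visited ++ [c])

def recursive_adjacency_matrix_dfs (graph : List (List Int)) (start : Int) : List Int :=
  pvDfsA (pvMatrixToDict graph) (graph.length + 1) [] start

-- ===== PORT B =====
-- row = graph[node] if 0 <= node < len(graph) else []; neighbors = [j for j in range(len(row)) if row[j] == 1]
def pvRowNbrs (graph : List (List Int)) (node : Int) : List Int :=
  let row := if 0 ≤ node ∧ node < (graph.length : Int) then PySem.List.pyGetD graph node ([] : List Int) else []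
  (PySem.List.pyRange 0 row.length 1).filter (fun j => PySem.List.pyGetD row j (0 : Int) = 1)

-- termination measure: dict-range vertices not yet visited
def pvR (graph : List (List Int)) (visited : List Int) : Nat :=
  ((PySem.List.pyRange 0 graph.length 1).filter (fun i => !visited.contains i)).length

-- lemmas the loop's termination proof cites
theorem pvFilter_not_contains_append_le (l v : List Int) (c : Int) :
    (l.filter (fun i => !(v ++ [c]).contains i)).length ≤ (l.filter (fun i => !v.contains i)).length := by
  induction l with
  | nil => simp
  | cons a l ih =>
    by_cases h : (v ++ [c]).contains a <;> by_cases h' : v.contains a <;>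
      simp_all [List.filter_cons] <;> omega

theorem pvFilter_not_contains_append_lt (l v : List Int) (c : Int)
    (hc : c ∈ l) (hv : v.contains c = false) :
    (l.filter (fun i => !(v ++ [c]).contains i)).length < (l.filter (fun i => !v.contains i)).length := by
  induction l with
  | nil => simp at hc
  | cons a l ih =>
    by_cases hac : a = c
    · subst hac
      have h1 : (v ++ [a]).contains a = true := by simp
      simp only [List.filter_cons, h1, hv, Bool.not_true, Bool.not_false,
        Bool.false_eq_true, if_false, if_true, List.length_cons]
      have := pvFilter_not_contains_append_le l v a
      omega
    · have hc' : c ∈ l := by cases hc with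
        | head => exact absurd rfl hac
        | tail _ h => exact h
      have hsame : (v ++ [c]).contains a = v.contains a := by
        simp [hac]
      by_cases h' : v.contains a <;> simp only [List.filter_cons, hsame, h'] <;>
        simpa using ih hc'

theorem pvR_append_lt (graph : List (List Int)) (v : List Int) (c : Int)
    (h0 : 0 ≤ c) (h1 : c < (graph.length : Int)) (hv : v.contains c = false) :
    pvR graph (v ++ [c]) < pvR graph v :=
  pvFilter_not_contains_append_lt _ v c (by rw [PySem.List.mem_pyRange_one]; omega) hv

theorem pvRowNbrs_out (graph : List (List Int)) (c : Int)
    (h : ¬(0 ≤ c ∧ c < (graph.length : Int))) : pvRowNbrs graph c = [] := by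
  simp [pvRowNbrs, h]

-- the explicit-stack loop; the Lean list head is the Python stack's top (its last element),
-- so stack.extend(reversed(neighbors)) is exactly prepending the ascending neighbor list
def pvBLoop (graph : List (List Int)) : List Int → List Int → List Int
  | visited, [] => visited
  | visited, node :: rest =>
    if visited.contains node then pvBLoop graph visited rest
    else pvBLoop graph (visited ++ [node]) (pvRowNbrs graph node ++ rest)
  termination_by visited stack => (pvR graph visited, stack.length)
  decreasing_by
  · exact Prod.Lex.right _ (Nat.lt_succ_self _)
  · rename_i hvis
    by_cases hr : 0 ≤ node ∧ node < (graph.length : Int)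
    · exact Prod.Lex.left _ _ (pvR_append_lt graph visited node hr.1 hr.2 (by simpa using hvis))
    · have he : pvR graph (visited ++ [node]) = pvR graph visited := by
        unfold pvR
        apply congrArg List.length
        apply List.filter_congr
        intro i hi
        rw [PySem.List.mem_pyRange_one] at hi
        have : i ≠ node := by omega
        simp [this]
      rw [he, pvRowNbrs_out graph node hr]
      exact Prod.Lex.right _ (Nat.lt_succ_self _)

def recursive_adjacency_matrix_dfs_alt (graph : List (List Int)) (start : Int) : List Int :=
  pvBLoop graph [] [start]

-- ===== PRECONDITION & SPEC =====
def Spec_recursive_adjacency_matrix_dfs (graph : List (List Int)) (start : Int) (out : List Int) : Prop := out = recursive_adjacency_matrix_dfs_alt graph start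
instance (graph : List (List Int)) (start : Int) (out : List Int) : Decidable (Spec_recursive_adjacency_matrix_dfs graph start out) := by unfold Spec_recursive_adjacency_matrix_dfs; infer_instance

-- ===== CLAIM (what is proved, stated in full; the proofs are below) =====
def Claim_equal_recursive_adjacency_matrix_dfs : Prop := ∀ (graph : List (List Int)) (start : Int), Dom_recursive_adjacency_matrix_dfs graph start → Spec_recursive_adjacency_matrix_dfs graph start (recursive_adjacency_matrix_dfs graph start)

-- ===== LEMMAS AND PROOFS =====

-- A's dict lookup + sort agrees with B's direct row read
theorem pv_items_dict (graph : List (List Int)) :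
    (pvMatrixToDict graph).items
      = (PySem.List.pyRange 0 graph.length 1).map (fun i => (i, pvNbrRow graph i)) := by
  unfold pvMatrixToDict
  rw [PySem.Dict.items_foldl_insert_fresh (PySem.List.pyRange 0 (graph.length : Int) 1)
    (fun i => i) (fun i => pvNbrRow graph i) PySem.Dict.empty (by intro a _; rfl)
    (by simpa using PySem.List.nodup_pyRange_one 0 (graph.length : Int))]
  rfl

theorem pv_adj_getD (graph : List (List Int)) (c : Int) :
    PySem.List.sorted ((pvMatrixToDict graph).getD c []) (fun x => x) false = pvRowNbrs graph c := by
  by_cases h : 0 ≤ c ∧ c < (graph.length : Int)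
  · have hmem : (c, pvNbrRow graph c) ∈ (pvMatrixToDict graph).items := by
      rw [pv_items_dict]
      exact List.mem_map_of_mem (by rw [PySem.List.mem_pyRange_one]; omega)
    have hnodup : (pvMatrixToDict graph).keys.Nodup := by
      unfold pvMatrixToDict
      exact PySem.Dict.nodup_keys_foldl_insert _ _ _ (by simp)
    rw [PySem.Dict.getD_of_mem_items _ hmem hnodup []]
    have hrow : pvNbrRow graph c
        = (PySem.List.pyRange 0 (PySem.List.pyGetD graph c ([] : List Int)).length 1).filter
            (fun j => PySem.List.pyGetD (PySem.List.pyGetD graph c ([] : List Int)) j (0 : Int) = 1) := by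
      unfold pvNbrRow
      rw [PySem.List.foldl_append_ite_eq_filter]
      simp
    rw [hrow]
    have hpair : ((PySem.List.pyRange 0 (PySem.List.pyGetD graph c ([] : List Int)).length 1).filter
        (fun j => PySem.List.pyGetD (PySem.List.pyGetD graph c ([] : List Int)) j (0 : Int) = 1)).Pairwise
        (fun a b => (fun x => x) a ≤ (fun x => x) b) := by
      apply List.Pairwise.filter
      exact (PySem.List.pairwise_lt_pyRange_one _ _).imp (fun h => le_of_lt h)
    rw [PySem.List.sorted_eq_self_of_pairwise _ _ hpair]
    simp [pvRowNbrs, h]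
  · have hnc : (pvMatrixToDict graph).contains c = false := by
      rw [← Bool.not_eq_true, PySem.Dict.contains_iff_mem_keys]
      have hk : (pvMatrixToDict graph).keys = PySem.List.pyRange 0 graph.length 1 := by
        show ((pvMatrixToDict graph).items.map (·.1)) = _
        rw [pv_items_dict, List.map_map]
        simp [Function.comp_def]
      rw [hk, PySem.List.mem_pyRange_one]
      omega
    rw [PySem.Dict.getD_of_not_contains _ _ hnc, pvRowNbrs_out graph c h]
    simp [PySem.List.sorted]

-- visited is a prefix of what dfs returns
theorem pv_foldl_prefix (f : List Int → Int → List Int) (hf : ∀ v c, v <+: f v c) :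
    ∀ (ns : List Int) (v : List Int), v <+: ns.foldl f v := by
  intro ns
  induction ns with
  | nil => intro v; simp
  | cons n ns ih =>
    intro v
    exact (hf v n).trans (ih (f v n))

theorem pv_dfsA_prefix (adj : PySem.Dict Int (List Int)) :
    ∀ (fuel : Nat) (v : List Int) (c : Int), v <+: pvDfsA adj fuel v c := by
  intro fuel
  induction fuel with
  | zero => intro v c; simp [pvDfsA]
  | succ fuel ih =>
    intro v c
    simp only [pvDfsA]
    split
    · simp
    · exact (List.prefix_append v [c]).trans (pv_foldl_prefix _ (fun v c => ih v c) _ _)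

theorem pvR_le_of_prefix (graph : List (List Int)) {v v' : List Int} (h : v <+: v') :
    pvR graph v' ≤ pvR graph v := by
  unfold pvR
  apply List.Sublist.length_le
  apply List.monotone_filter_right
  intro i hi
  simp only [Bool.not_eq_eq_eq_not, Bool.not_true, List.contains_eq_mem,
    decide_eq_false_iff_not] at *
  exact fun hm => hi (h.subset hm)

-- the heart: running the stack loop from dfs's result equals pushing c and running it
theorem pv_dfs_bloop (graph : List (List Int)) (adj : PySem.Dict Int (List Int))
    (hadj : ∀ c, PySem.List.sorted (adj.getD c []) (fun x => x) false = pvRowNbrs graph c) :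
    ∀ (fuel : Nat) (visited : List Int) (c : Int) (stack : List Int),
      pvR graph visited < fuel →
      pvBLoop graph (pvDfsA adj fuel visited c) stack = pvBLoop graph visited (c :: stack) := by
  intro fuel
  induction fuel with
  | zero => intro _ _ _ h; omega
  | succ fuel ih =>
    intro visited c stack hlt
    have hfold : ∀ (ns : List Int) (v : List Int) (st : List Int),
        (pvR graph v < fuel ∨ ns = []) →
        pvBLoop graph (ns.foldl (fun v n => pvDfsA adj fuel v n) v) st
          = pvBLoop graph v (ns ++ st) := by
      intro ns
      induction ns with
      | nil => intro v st _; simp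
      | cons n ns ihn =>
        intro v st h
        have hv : pvR graph v < fuel := by
          rcases h with h | h
          · exact h
          · simp at h
        have h1 : pvR graph (pvDfsA adj fuel v n) < fuel :=
          lt_of_le_of_lt (pvR_le_of_prefix graph (pv_dfsA_prefix adj fuel v n)) hv
        simp only [List.foldl_cons]
        rw [ihn (pvDfsA adj fuel v n) st (Or.inl h1), ih v n (ns ++ st) hv]
        rfl
    simp only [pvDfsA, hadj]
    by_cases hc : visited.contains c = true
    · rw [if_pos hc]
      conv_rhs => rw [pvBLoop]
      rw [if_pos hc]
    · rw [if_neg hc]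
      have hdisj : pvR graph (visited ++ [c]) < fuel ∨ pvRowNbrs graph c = [] := by
        by_cases hr : 0 ≤ c ∧ c < (graph.length : Int)
        · left
          have := pvR_append_lt graph visited c hr.1 hr.2 (by simpa using hc)
          omega
        · right; exact pvRowNbrs_out graph c hr
      rw [hfold (pvRowNbrs graph c) (visited ++ [c]) stack hdisj]
      conv_rhs => rw [pvBLoop]
      rw [if_neg hc]

theorem pv_bloop_nil (graph : List (List Int)) (v : List Int) : pvBLoop graph v [] = v := by
  rw [pvBLoop]

-- ===== VERDICT (by name: the statement is the Claim_ definition above) =====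
theorem recursive_adjacency_matrix_dfs_spec : Claim_equal_recursive_adjacency_matrix_dfs := by
  intro graph start _
  unfold Spec_recursive_adjacency_matrix_dfs
  unfold recursive_adjacency_matrix_dfs recursive_adjacency_matrix_dfs_alt
  have hR : pvR graph [] < graph.length + 1 := by
    have := List.length_filter_le (fun i => !([] : List Int).contains i)
      (PySem.List.pyRange 0 graph.length 1)
    unfold pvR
    have hlen : (PySem.List.pyRange 0 (graph.length : Int) 1).length = graph.length := by
      rw [PySem.List.length_pyRange_one]; omega
    omega
  have := pv_dfs_bloop graph (pvMatrixToDict graph) (pv_adj_getD graph)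
    (graph.length + 1) [] start [] hR
  rw [pv_bloop_nil] at this
  exact this
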